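-- pv_equiv track=rewrite | github.com/Yorr-cann/protect | protect/protect5.py | _is_datacenter_ip
-- ===== SOURCE A (Python) =====
-- import ipaddress
--
-- def _is_datacenter_ip(ip_address: str) -> bool:
--     """Check jika IP dari datacenter"""
--     try:
--         ip = ipaddress.ip_address(ip_address)
--
--         # Known datacenter IP ranges
--         datacenter_ranges = [
--             '3.0.0.0/9',      # AWS
--             '34.0.0.0/8',     # Google Cloud
--             '13.0.0.0/8',     # Microsoft Azure
--             '52.0.0.0/8',     # AWS
--             '35.0.0.0/8',     # Google Cloud
--             '20.0.0.0/8',     # Microsoft Azure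
--         ]
--
--         for range_str in datacenter_ranges:
--             if ip in ipaddress.ip_network(range_str):
--                 return True
--     except:
--         pass
--
--     return False
-- ===== SOURCE B (Python) =====
-- # One regex match instead of address/network objects: a dotted quad of plain decimal
-- # numbers (no leading zeros), each value <= 255.  Every datacenter range is a /8 (or
-- # the lower half of one), so membership needs only the first octet (plus one
-- # half-block test for 3.0.0.0/9) -- no per-range loop.
--
-- import re
--
-- _IPV4_RE = re.compile(r'(0|[1-9][0-9]{0,2})\.(0|[1-9][0-9]{0,2})\.(0|[1-9][0-9]{0,2})\.(0|[1-9][0-9]{0,2})')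
--
-- _DC_FIRST_OCTETS = {13, 20, 34, 35, 52}
--
-- def _is_datacenter_ip(ip_address: str) -> bool:
--     """Check jika IP dari datacenter"""
--     m = _IPV4_RE.fullmatch(ip_address)
--     if m is None:
--         return False
--     first, second, third, fourth = (int(g) for g in m.groups())
--     if max(first, second, third, fourth) > 255:
--         return False
--     return first in _DC_FIRST_OCTETS or (first == 3 and second < 128)
-- ===== Notes on version B (the rewrite author's own statement) =====
-- stated objective: simpler
-- what changed: B replaces the address/network objects and the six-range loop by a single regex fullmatch of a dotted quad of plain decimal numbers plus a first-octet set test (with one half-block comparison for 3.0.0.0/9), since every range is a /8 or the lower half of one.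
import Mathlib
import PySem

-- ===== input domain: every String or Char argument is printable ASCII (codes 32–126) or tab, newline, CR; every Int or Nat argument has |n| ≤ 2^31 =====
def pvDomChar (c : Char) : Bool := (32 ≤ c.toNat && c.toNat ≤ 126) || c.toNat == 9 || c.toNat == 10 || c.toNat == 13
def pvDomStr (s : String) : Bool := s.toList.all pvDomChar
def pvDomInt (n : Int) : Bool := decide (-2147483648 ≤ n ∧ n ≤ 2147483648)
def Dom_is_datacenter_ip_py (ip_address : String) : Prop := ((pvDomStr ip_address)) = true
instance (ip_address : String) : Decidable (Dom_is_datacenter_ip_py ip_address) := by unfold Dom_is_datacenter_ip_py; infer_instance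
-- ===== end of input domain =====

-- B replaces A's address/network objects and per-range loop by one regex fullmatch
-- (a dotted quad of plain decimal numbers) plus a first-octet set test (objective: simpler).

-- ===== PORT A =====
-- Model of the ipaddress library that A calls: CPython's IPv4Address._parse_octet /
-- _ip_int_from_string, exact on the printable-ASCII domain.  ip_address also tries an IPv6
-- parse after an IPv4 failure, but in A a non-IPv4 result leads straight to False exactly
-- like a parse failure (version-mismatch membership is False, the bare except swallows
-- ValueError), so v6/invalid both collapse to `none`.
def pvParseOctet? (cs : List Char) : Option Int :=
  if cs = [] then none                                   -- "Empty octet not permitted"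
  else if ¬ (cs.all Char.isDigit) then none              -- "Only decimal digits permitted" (ASCII domain)
  else if cs.length > 3 then none                        -- "At most 3 characters permitted"
  else if cs ≠ ['0'] ∧ cs.headD ' ' = '0' then none      -- "Leading zeros are not permitted"
  else
    let v : Int := cs.foldl (fun a c => a * 10 + ((c.toNat : Int) - 48)) 0   -- int(octet_str, 10) on digits
    if v > 255 then none else some v                     -- "Octet (> 255) not permitted"

def pvIPv4Int? (s : String) : Option Int :=
  match PySem.Chars.splitOn s.toList ['.'] with
  | [p0, p1, p2, p3] =>
    match pvParseOctet? p0, pvParseOctet? p1, pvParseOctet? p2, pvParseOctet? p3 with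
    | some a, some b, some c, some d => some (a * 16777216 + b * 65536 + c * 256 + d)
    | _, _, _, _ => none
  | _ => none

-- ip_network('a.b.c.d/p') → (network-address int, block size 2^(32-p)); CPython checks
-- that no host bits are set (strict networks).
def pvParseNet? (r : String) : Option (Int × Int) :=
  match PySem.Chars.splitOn r.toList ['/'] with
  | [addr, plen] =>
    match pvIPv4Int? (String.ofList addr), PySem.Int.ofChars? plen with
    | some net, some p =>
      if 0 ≤ p ∧ p ≤ 32 then
        let block : Int := 2 ^ (32 - p.toNat)
        if PySem.Int.floordiv net block * block = net then some (net, block) else none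
      else none
    | _, _ => none
  | _ => none

def pvDcRanges : List String :=
  ["3.0.0.0/9", "34.0.0.0/8", "13.0.0.0/8", "52.0.0.0/8", "35.0.0.0/8", "20.0.0.0/8"]

-- the for-loop; `ip in network` is other._ip & netmask == network_address, and the AND with
-- a contiguous netmask is ported as floor-division by the block size (exact for 0 ≤ n < 2^32).
def pvALoop (n : Int) : List String → Bool
  | [] => false
  | r :: rs =>
    match pvParseNet? r with
    | none => false          -- ip_network raises → bare except → return False
    | some (net, block) =>
      if PySem.Int.floordiv n block * block = net then true else pvALoop n rs

def is_datacenter_ip_py (ip_address : String) : Bool :=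
  match pvIPv4Int? ip_address with
  | none => false
  | some n => pvALoop n pvDcRanges

-- ===== PORT B =====
-- Source B matches the regex (0|[1-9][0-9]{0,2})\.(…)\.(…)\.(…) with re.fullmatch.  The engine
-- is ported step for step: at each group the candidate matches of the octet pattern, in the
-- engine's preference order (left alternative first, greedy {0,2}), each tried against the
-- continuation — exact backtracking regex matching for this pattern.
def pvD (c : Char) : Bool := decide ('0' ≤ c) && decide (c ≤ '9')      -- [0-9]
def pvNZ (c : Char) : Bool := decide ('1' ≤ c) && decide (c ≤ '9')    -- [1-9]

def pvOctetCands (cs : List Char) : List (List Char × List Char) :=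
  (match cs with                                                       -- alternative 0
   | '0' :: r => [(['0'], r)]
   | _ => []) ++
  (match cs with                                                       -- [1-9][0-9]{2}
   | c1 :: c2 :: c3 :: r => if pvNZ c1 && pvD c2 && pvD c3 then [([c1, c2, c3], r)] else []
   | _ => []) ++
  (match cs with                                                       -- [1-9][0-9]
   | c1 :: c2 :: r => if pvNZ c1 && pvD c2 then [([c1, c2], r)] else []
   | _ => []) ++
  (match cs with                                                       -- [1-9]
   | c1 :: r => if pvNZ c1 then [([c1], r)] else []
   | _ => [])

-- fullmatch of k+1 groups separated by '.': first candidate whose continuation succeeds;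
-- returns the captured groups.
def pvMatchQuad : Nat → List Char → Option (List (List Char))
  | k, cs =>
    (pvOctetCands cs).findSome? (fun gr =>
      match k with
      | 0 => if gr.2 = [] then some [gr.1] else none
      | Nat.succ k' =>
        match gr.2 with
        | '.' :: rest => (pvMatchQuad k' rest).map (gr.1 :: ·)
        | _ => none)

def pvGroupInt (g : List Char) : Int :=       -- int(m.group(i)) on an all-digit group
  g.foldl (fun a c => a * 10 + ((c.toNat : Int) - 48)) 0

def pvDcFirstOctets : PySem.Set Int := PySem.Set.ofList [13, 20, 34, 35, 52]

def is_datacenter_ip_py_alt (ip_address : String) : Bool :=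
  match pvMatchQuad 3 ip_address.toList with
  | none => false
  | some gs =>
    match gs.map pvGroupInt with               -- first, second, third, fourth = (int(g) …)
    | [first, second, third, fourth] =>
      if max (max (max first second) third) fourth > 255 then false
      else PySem.Set.contains pvDcFirstOctets first || (decide (first = 3) && decide (second < 128))
    | _ => false                               -- unreachable: fullmatch yields 4 groups

-- ===== PRECONDITION & SPEC =====
def Spec_is_datacenter_ip_py (ip_address : String) (out : Bool) : Prop := out = is_datacenter_ip_py_alt ip_address
instance (ip_address : String) (out : Bool) : Decidable (Spec_is_datacenter_ip_py ip_address out) := by unfold Spec_is_datacenter_ip_py; infer_instance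

-- ===== CLAIM (what is proved, stated in full; the proofs are below) =====
def Claim_equal_is_datacenter_ip_py : Prop := ∀ (ip_address : String), Dom_is_datacenter_ip_py ip_address → Spec_is_datacenter_ip_py ip_address (is_datacenter_ip_py ip_address)

-- ===== LEMMAS AND PROOFS =====

-- a simple structural recursion computing str.split('.')
def pvSplit : List Char → List (List Char)
  | [] => [[]]
  | c :: r =>
    if c = '.' then [] :: pvSplit r
    else
      match pvSplit r with
      | t :: ts => (c :: t) :: ts
      | [] => [[c]]

def pvConsHead (pre : List Char) : List (List Char) → List (List Char)
  | [] => [pre]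
  | t :: ts => (pre ++ t) :: ts

lemma pvSplit_ne_nil (l : List Char) : pvSplit l ≠ [] := by
  cases l with
  | nil => simp [pvSplit]
  | cons c r =>
    simp only [pvSplit]
    split_ifs
    · simp
    · cases pvSplit r <;> simp

lemma pvGo_eq (l : List Char) : ∀ (fuel : Nat) (cur : List Char) (acc : List (List Char)),
    l.length < fuel →
    PySem.Chars.splitOn.go ['.'] fuel l cur acc = acc.reverse ++ pvConsHead cur.reverse (pvSplit l) := by
  induction l with
  | nil =>
    intro fuel cur acc h
    cases fuel with
    | zero => omega
    | succ n => simp [PySem.Chars.splitOn.go, pvSplit, pvConsHead]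
  | cons c r ih =>
    intro fuel cur acc h
    cases fuel with
    | zero => simp at h
    | succ n =>
      have hr : r.length < n := by simp at h; omega
      by_cases hc : c = '.'
      · subst hc
        rw [show PySem.Chars.splitOn.go ['.'] (n+1) ('.' :: r) cur acc
              = PySem.Chars.splitOn.go ['.'] n r [] (cur.reverse :: acc) by
          simp [PySem.Chars.splitOn.go, List.isPrefixOf]]
        rw [ih n [] (cur.reverse :: acc) hr]
        rcases hs : pvSplit r with _ | ⟨t, ts⟩
        · exact absurd hs (pvSplit_ne_nil r)
        · simp [pvSplit, pvConsHead, hs]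
      · rw [show PySem.Chars.splitOn.go ['.'] (n+1) (c :: r) cur acc
              = PySem.Chars.splitOn.go ['.'] n r (c :: cur) acc by
          simp only [PySem.Chars.splitOn.go, List.isPrefixOf, Bool.and_true, beq_iff_eq]
          rw [if_neg (by simpa using fun h => hc h.symm)]]
        rw [ih n (c :: cur) acc hr]
        rcases hs : pvSplit r with _ | ⟨t, ts⟩
        · exact absurd hs (pvSplit_ne_nil r)
        · simp [pvSplit, pvConsHead, hs, hc]

lemma pvSplitOn_eq (cs : List Char) : PySem.Chars.splitOn cs ['.'] = pvSplit cs := by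
  rw [show PySem.Chars.splitOn cs ['.'] = PySem.Chars.splitOn.go ['.'] (cs.length + 1) cs [] [] from rfl]
  rw [pvGo_eq cs (cs.length + 1) [] [] (by omega)]
  rcases hs : pvSplit cs with _ | ⟨t, ts⟩
  · exact absurd hs (pvSplit_ne_nil cs)
  · simp [pvConsHead]

-- the token structure of pvSplit
lemma pvSplit_eq_tok (cs : List Char) :
    pvSplit cs = cs.takeWhile (· ≠ '.') ::
      (match cs.dropWhile (· ≠ '.') with
       | [] => []
       | _ :: r => pvSplit r) := by
  induction cs with
  | nil => simp [pvSplit]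
  | cons c r ih =>
    by_cases hc : c = '.'
    · subst hc; simp [pvSplit, List.takeWhile, List.dropWhile]
    · simp only [pvSplit, List.takeWhile_cons, List.dropWhile_cons, if_neg hc]
      rw [ih]
      simp [hc]

-- "the regex octet pattern matches p exactly"
def pvOk (p : List Char) : Bool :=
  !p.isEmpty && p.all pvD && decide (p.length ≤ 3) && (decide (p = ['0']) || !(p.headD ' ' == '0'))

-- character-class facts
lemma pvD_iff (c : Char) : pvD c = true ↔ 48 ≤ c.toNat ∧ c.toNat ≤ 57 := by
  simp [pvD, Char.le_def, UInt32.le_iff_toNat_le]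

lemma pvNZ_iff (c : Char) : pvNZ c = true ↔ 49 ≤ c.toNat ∧ c.toNat ≤ 57 := by
  simp [pvNZ, Char.le_def, UInt32.le_iff_toNat_le]

lemma pvChar_eq_of_toNat {c : Char} {d : Char} (h : c.toNat = d.toNat) : c = d := by
  have h1 : Char.ofNat c.toNat = c := Char.ofNat_toNat c
  have h2 : Char.ofNat d.toNat = d := Char.ofNat_toNat d
  rw [← h1, ← h2, h]

lemma pvD_trichotomy (c : Char) (h0 : c ≠ '0') (h9 : ¬ pvNZ c = true) : pvD c = false := by
  by_contra h
  have hd : pvD c = true := by simpa using h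
  rw [pvD_iff] at hd
  rw [pvNZ_iff] at h9
  have : c.toNat = 48 := by omega
  exact h0 (pvChar_eq_of_toNat (by simpa using this))

lemma pvD_ne_dot {c : Char} (h : pvD c = true) : c ≠ '.' := by
  intro he; subst he; simp [pvD] at h

lemma pvNZ_D {c : Char} (h : pvNZ c = true) : pvD c = true := by
  rw [pvNZ_iff] at h; rw [pvD_iff]; omega

lemma pvNZ_ne_dot {c : Char} (h : pvNZ c = true) : c ≠ '.' := pvD_ne_dot (pvNZ_D h)

-- the candidate scan: with a continuation that fails unless the rest starts at a '.' (or is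
-- consumed downstream from one), the alternation equals "the token up to the next '.' matches"
lemma pvCands_spec (cs : List Char) (st : List Char × List Char → Option (List (List Char)))
    (hst : ∀ g c r, c ≠ '.' → st (g, c :: r) = none) :
    (pvOctetCands cs).findSome? st =
      if pvOk (cs.takeWhile (· ≠ '.')) = true then
        st (cs.takeWhile (· ≠ '.'), cs.dropWhile (· ≠ '.'))
      else none := by
  rcases cs with _ | ⟨c1, l1⟩
  · simp [pvOctetCands, pvOk]
  by_cases h10 : c1 = '0'
  · subst h10
    have hnz : pvNZ '0' = false := by decide
    have hcand : pvOctetCands ('0' :: l1) = [(['0'], l1)] := by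
      rcases l1 with _ | ⟨c2, _ | ⟨c3, l3⟩⟩ <;> simp [pvOctetCands, hnz]
    rw [hcand]
    rcases l1 with _ | ⟨c, l2⟩
    · cases hx : st (['0'], []) <;>
        simp [List.findSome?, hx, List.takeWhile, List.dropWhile, pvOk, (by decide : pvD '0' = true)]
    · by_cases hc : c = '.'
      · subst hc
        cases hx : st (['0'], '.' :: l2) <;>
          simp [List.findSome?, hx, List.takeWhile, List.dropWhile, pvOk,
            (by decide : pvD '0' = true)]
      · rw [List.findSome?]
        simp only [hst _ _ _ hc]
        rw [if_neg ?_, List.findSome?]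
        simp only [List.takeWhile_cons]
        simp [hc, pvOk]
  by_cases h19 : pvNZ c1 = true
  · have hd1 : pvD c1 = true := pvNZ_D h19
    have hne1 : c1 ≠ '.' := pvNZ_ne_dot h19
    rcases l1 with _ | ⟨c2, l2⟩
    · have hcand : pvOctetCands [c1] = [([c1], [])] := by
        simp [pvOctetCands, h10, h19]
      rw [hcand]
      cases hx : st ([c1], []) <;>
        simp [List.findSome?, hx, List.takeWhile, List.dropWhile, pvOk, hne1, hd1, h10]
    · by_cases h2 : pvD c2 = true
      · have hne2 : c2 ≠ '.' := pvD_ne_dot h2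
        rcases l2 with _ | ⟨c3, l3⟩
        · have hcand : pvOctetCands [c1, c2] = [([c1, c2], []), ([c1], [c2])] := by
            simp [pvOctetCands, h10, h19, h2]
          rw [hcand]
          cases hx : st ([c1, c2], []) <;>
            simp [List.findSome?, hx, hst _ _ _ hne2, List.takeWhile, List.dropWhile, pvOk,
              hne1, hne2, hd1, h2, h10]
        · by_cases h3 : pvD c3 = true
          · have hne3 : c3 ≠ '.' := pvD_ne_dot h3
            have hcand : pvOctetCands (c1 :: c2 :: c3 :: l3) =
                [([c1, c2, c3], l3), ([c1, c2], c3 :: l3), ([c1], c2 :: c3 :: l3)] := by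
              simp [pvOctetCands, h10, h19, h2, h3]
            rw [hcand]
            rcases l3 with _ | ⟨c4, l4⟩
            · cases hx : st ([c1, c2, c3], []) <;>
                simp [List.findSome?, hx, hst _ _ _ hne2, hst _ _ _ hne3, List.takeWhile,
                  List.dropWhile, pvOk, hne1, hne2, hne3, hd1, h2, h3, h10]
            · by_cases h4 : c4 = '.'
              · subst h4
                cases hx : st ([c1, c2, c3], '.' :: l4) <;>
                  simp [List.findSome?, hx, hst _ _ _ hne2, hst _ _ _ hne3, List.takeWhile,
                    List.dropWhile, pvOk, hne1, hne2, hne3, hd1, h2, h3, h10]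
              · simp only [List.findSome?, hst _ _ _ h4, hst _ _ _ hne2, hst _ _ _ hne3]
                rw [if_neg ?_]
                simp only [List.takeWhile_cons]
                simp [hne1, hne2, hne3, h4, pvOk]
          · by_cases h3d : c3 = '.'
            · subst h3d
              have hcand : pvOctetCands (c1 :: c2 :: '.' :: l3) =
                  [([c1, c2], '.' :: l3), ([c1], c2 :: '.' :: l3)] := by
                simp [pvOctetCands, h10, h19, h2, (by decide : pvD '.' = false)]
              rw [hcand]
              cases hx : st ([c1, c2], '.' :: l3) <;>
                simp [List.findSome?, hx, hst _ _ _ hne2, List.takeWhile, List.dropWhile,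
                  pvOk, hne1, hne2, hd1, h2, h10]
            · have hd3 : pvD c3 = false := by simpa using h3
              have hcand : pvOctetCands (c1 :: c2 :: c3 :: l3) =
                  [([c1, c2], c3 :: l3), ([c1], c2 :: c3 :: l3)] := by
                simp [pvOctetCands, h10, h19, h2, hd3]
              rw [hcand]
              simp only [List.findSome?, hst _ _ _ h3d, hst _ _ _ hne2]
              rw [if_neg ?_]
              simp only [List.takeWhile_cons]
              simp [hne1, hne2, h3d, pvOk, hd3]
      · have hd2 : pvD c2 = false := by simpa using h2
        by_cases h2d : c2 = '.'
        · subst h2d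
          have hcand : pvOctetCands (c1 :: '.' :: l2) = [([c1], '.' :: l2)] := by
            rcases l2 with _ | ⟨c3, l3⟩ <;>
              simp [pvOctetCands, h10, h19, (by decide : pvD '.' = false)]
          rw [hcand]
          cases hx : st ([c1], '.' :: l2) <;>
            simp [List.findSome?, hx, List.takeWhile, List.dropWhile, pvOk, hne1, hd1, h10]
        · have hcand : pvOctetCands (c1 :: c2 :: l2) = [([c1], c2 :: l2)] := by
            rcases l2 with _ | ⟨c3, l3⟩ <;> simp [pvOctetCands, h10, h19, hd2]
          rw [hcand]
          simp only [List.findSome?, hst _ _ _ h2d]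
          rw [if_neg ?_]
          simp only [List.takeWhile_cons]
          simp [hne1, h2d, pvOk, hd2]
  · have hd1 : pvD c1 = false := pvD_trichotomy c1 h10 h19
    have hnz1 : pvNZ c1 = false := by simpa using h19
    have hcand : pvOctetCands (c1 :: l1) = [] := by
      rcases l1 with _ | ⟨c2, _ | ⟨c3, l3⟩⟩ <;> simp [pvOctetCands, h10, hnz1]
    rw [hcand]
    by_cases hdot : c1 = '.'
    · subst hdot
      simp [List.findSome?, List.takeWhile, pvOk]
    · rw [List.findSome?_nil, if_neg ?_]
      simp only [List.takeWhile_cons]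
      simp [hdot, pvOk, hd1]

-- the matcher equals: split at '.', k+1 parts, each matched by the octet pattern
lemma pvDropWhile_head (cs : List Char) :
    cs.dropWhile (· ≠ '.') = [] ∨ ∃ r, cs.dropWhile (· ≠ '.') = '.' :: r := by
  induction cs with
  | nil => left; rfl
  | cons c r ih =>
    by_cases hc : c = '.'
    · subst hc; right; exact ⟨r, by simp [List.dropWhile]⟩
    · simpa [List.dropWhile, hc] using ih

lemma pvMatchQuad_spec : ∀ (k : Nat) (cs : List Char),
    pvMatchQuad k cs =
      if (pvSplit cs).length = k + 1 ∧ (pvSplit cs).all pvOk = true then some (pvSplit cs)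
      else none := by
  intro k
  induction k with
  | zero =>
    intro cs
    rw [pvMatchQuad, pvCands_spec cs _ (by intro g c r hc; simp)]
    rw [pvSplit_eq_tok cs]
    rcases pvDropWhile_head cs with hd | ⟨r, hd⟩ <;> rw [hd]
    · by_cases hok : pvOk (cs.takeWhile (· ≠ '.')) = true <;> simp_all
    · by_cases hok : pvOk (cs.takeWhile (· ≠ '.')) = true <;> simp [pvSplit_ne_nil r]
  | succ k ih =>
    intro cs
    rw [pvMatchQuad, pvCands_spec cs _ ?hst]
    case hst =>
      intro g c r hc
      dsimp only
      split
      · next heq => simp_all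
      · rfl
    rw [pvSplit_eq_tok cs]
    rcases pvDropWhile_head cs with hd | ⟨r, hd⟩ <;> rw [hd]
    · by_cases hok : pvOk (cs.takeWhile (· ≠ '.')) = true <;> simp_all
    · simp only [ih r]
      by_cases hok : pvOk (cs.takeWhile (· ≠ '.')) = true <;>
        by_cases hcr : (pvSplit r).length = k + 1 ∧ (pvSplit r).all pvOk = true <;>
        simp_all

lemma pvFoldl_digits_nonneg (cs : List Char) (a : Int) (hd : cs.all Char.isDigit = true)
    (h : 0 ≤ a) : 0 ≤ cs.foldl (fun a c => a * 10 + ((c.toNat : Int) - 48)) a := by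
  induction cs generalizing a with
  | nil => simpa using h
  | cons c cs ih =>
    simp only [List.all_cons, Bool.and_eq_true] at hd
    have hc : 48 ≤ (c.toNat : Int) := by
      have h1 := hd.1
      simp only [Char.isDigit, ge_iff_le, Bool.and_eq_true, decide_eq_true_eq] at h1
      have h2 : (48 : Nat) ≤ c.toNat := UInt32.le_iff_toNat_le.mp h1.1
      exact_mod_cast h2
    exact ih _ hd.2 (by nlinarith)

lemma pvD_eq_isDigit (c : Char) : pvD c = c.isDigit := by
  rw [Bool.eq_iff_iff, pvD_iff]
  simp only [Char.isDigit, ge_iff_le, Bool.and_eq_true, decide_eq_true_eq,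
    UInt32.le_iff_toNat_le]
  constructor
  · intro h; exact ⟨h.1, h.2⟩
  · intro h; exact ⟨h.1, h.2⟩

lemma pvOk_parse (p : List Char) (h : pvOk p = true) :
    pvParseOctet? p = if 255 < pvGroupInt p then none else some (pvGroupInt p) := by
  simp only [pvOk, Bool.and_eq_true, Bool.or_eq_true, Bool.not_eq_true', decide_eq_true_eq,
    beq_eq_false_iff_ne, List.isEmpty_eq_false_iff] at h
  obtain ⟨⟨⟨hne, hall⟩, hlen⟩, hz⟩ := h
  have hall' : p.all Char.isDigit = true := by
    rw [List.all_eq_true] at hall ⊢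
    intro c hcm
    rw [← pvD_eq_isDigit]
    exact hall c hcm
  have hlead : ¬ (p ≠ ['0'] ∧ p.headD ' ' = '0') := by
    rcases hz with hz | hz
    · intro hcon; exact hcon.1 hz
    · intro hcon; exact hz hcon.2
  unfold pvParseOctet?
  rw [if_neg hne, if_neg (by simp [hall']), if_neg (by omega), if_neg hlead]
  unfold pvGroupInt
  split_ifs <;> simp_all

lemma pvOk_nonneg (p : List Char) (h : pvOk p = true) : 0 ≤ pvGroupInt p := by
  simp only [pvOk, Bool.and_eq_true, decide_eq_true_eq] at h
  have hall : p.all Char.isDigit = true := by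
    rw [List.all_eq_true] at *
    intro c hcm
    rw [← pvD_eq_isDigit]
    exact h.1.1.2 c hcm
  exact pvFoldl_digits_nonneg p 0 hall le_rfl

lemma pvNotOk_parse (p : List Char) (h : pvOk p = false) : pvParseOctet? p = none := by
  unfold pvParseOctet?
  split_ifs with h1 h2 h3 h4 <;> try rfl
  exfalso
  have hall : p.all pvD = true := by
    rw [List.all_eq_true] at h2 ⊢
    intro c hcm; rw [pvD_eq_isDigit]; exact h2 c hcm
  have hOk : pvOk p = true := by
    unfold pvOk
    have e1 : p.isEmpty = false := by simpa [List.isEmpty_iff] using h1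
    have hlen : p.length ≤ 3 := by omega
    rw [e1, hall, decide_eq_true hlen]
    simp only [Bool.not_false, Bool.true_and, Bool.and_true]
    by_cases hp0 : p = ['0']
    · simp [hp0]
    · have hh : p.headD ' ' ≠ '0' := fun hh => h4 ⟨hp0, hh⟩
      simp only [List.headD] at hh ⊢
      simp [hp0, hh]
  rw [h] at hOk
  exact Bool.false_ne_true hOk

-- With the six range constants evaluated, A's loop on the 32-bit value of the octets
-- agrees with B's first-octet set lookup plus the 3.0.0.0/9 half-block test.
lemma pvCore (a b c d : Int) (ha : 0 ≤ a ∧ a ≤ 255) (hb : 0 ≤ b ∧ b ≤ 255)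
    (hc : 0 ≤ c ∧ c ≤ 255) (hd : 0 ≤ d ∧ d ≤ 255) :
    pvALoop (a * 16777216 + b * 65536 + c * 256 + d) pvDcRanges =
      (PySem.Set.contains pvDcFirstOctets a || (decide (a = 3) && decide (b < 128))) := by
  have r1 : pvParseNet? "3.0.0.0/9" = some (50331648, 8388608) := by rfl
  have r2 : pvParseNet? "34.0.0.0/8" = some (570425344, 16777216) := by rfl
  have r3 : pvParseNet? "13.0.0.0/8" = some (218103808, 16777216) := by rfl
  have r4 : pvParseNet? "52.0.0.0/8" = some (872415232, 16777216) := by rfl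
  have r5 : pvParseNet? "35.0.0.0/8" = some (587202560, 16777216) := by rfl
  have r6 : pvParseNet? "20.0.0.0/8" = some (335544320, 16777216) := by rfl
  have e1 : ∀ x : Int, PySem.Int.floordiv x 8388608 = x / 8388608 :=
    fun x => PySem.Int.floordiv_eq_ediv_of_pos (by norm_num)
  have e2 : ∀ x : Int, PySem.Int.floordiv x 16777216 = x / 16777216 :=
    fun x => PySem.Int.floordiv_eq_ediv_of_pos (by norm_num)
  simp only [pvDcRanges, pvALoop, r1, r2, r3, r4, r5, r6, e1, e2]
  rw [Bool.eq_iff_iff]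
  simp only [pvDcFirstOctets, PySem.Set.contains, PySem.Set.ofList, Bool.or_eq_true,
    Bool.and_eq_true, decide_eq_true_eq, List.contains_eq_mem]
  split_ifs <;> simp_all <;> omega

-- ===== VERDICT (by name: the statement is the Claim_ definition above) =====
theorem is_datacenter_ip_py_spec : Claim_equal_is_datacenter_ip_py := by
  intro s _
  unfold Spec_is_datacenter_ip_py is_datacenter_ip_py is_datacenter_ip_py_alt pvIPv4Int?
  rw [pvSplitOn_eq, pvMatchQuad_spec]
  rcases hp : pvSplit s.toList with _ | ⟨p0, _ | ⟨p1, _ | ⟨p2, _ | ⟨p3, _ | ⟨p4, tl⟩⟩⟩⟩⟩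
  · simp
  · simp
  · simp
  · simp
  · -- exactly four parts
    by_cases h0 : pvOk p0 = true
    case neg => simp [pvNotOk_parse p0 (by simpa using h0), (by simpa using h0 : pvOk p0 = false)]
    by_cases h1 : pvOk p1 = true
    case neg => simp [pvNotOk_parse p1 (by simpa using h1), (by simpa using h1 : pvOk p1 = false),
      pvOk_parse p0 h0]
    by_cases h2 : pvOk p2 = true
    case neg => simp [pvNotOk_parse p2 (by simpa using h2), (by simpa using h2 : pvOk p2 = false),
      pvOk_parse p0 h0, pvOk_parse p1 h1]
    by_cases h3 : pvOk p3 = true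
    case neg => simp [pvNotOk_parse p3 (by simpa using h3), (by simpa using h3 : pvOk p3 = false),
      pvOk_parse p0 h0, pvOk_parse p1 h1, pvOk_parse p2 h2]
    have n0 := pvOk_nonneg p0 h0
    have n1 := pvOk_nonneg p1 h1
    have n2 := pvOk_nonneg p2 h2
    have n3 := pvOk_nonneg p3 h3
    by_cases b0 : 255 < pvGroupInt p0
    · simp [b0, h0, h1, h2, h3, pvOk_parse p0 h0]
    by_cases b1 : 255 < pvGroupInt p1
    · simp [b0, b1, h0, h1, h2, h3, pvOk_parse p0 h0, pvOk_parse p1 h1]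
    by_cases b2 : 255 < pvGroupInt p2
    · simp [b0, b1, b2, h0, h1, h2, h3, pvOk_parse p0 h0, pvOk_parse p1 h1, pvOk_parse p2 h2]
    by_cases b3 : 255 < pvGroupInt p3
    · simp [b0, b1, b2, b3, h0, h1, h2, h3, pvOk_parse p0 h0, pvOk_parse p1 h1,
        pvOk_parse p2 h2, pvOk_parse p3 h3]
    have hmax : ¬ (max (max (max (pvGroupInt p0) (pvGroupInt p1)) (pvGroupInt p2)) (pvGroupInt p3) > 255) := by
      simp only [gt_iff_lt, not_lt, max_le_iff]
      omega
    rw [if_pos (by simp [h0, h1, h2, h3])]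
    simp only [pvOk_parse p0 h0, pvOk_parse p1 h1, pvOk_parse p2 h2, pvOk_parse p3 h3]
    rw [if_neg b0, if_neg b1, if_neg b2, if_neg b3]
    dsimp only [List.map]
    rw [if_neg hmax]
    exact pvCore _ _ _ _ ⟨n0, by omega⟩ ⟨n1, by omega⟩ ⟨n2, by omega⟩ ⟨n3, by omega⟩
  · -- five or more parts: both sides are False
    simp
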